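-- pv_equiv track=rewrite | github.com/SeeleAI/gamedevbench-mcp | game_mcp_server/util/fuzzy_replace.py | _lines_to_span
-- ===== SOURCE A (Python) =====
-- from typing import Callable, List, Optional, Tuple
--
-- def _lines_to_span(content_lines: List[str], start_line: int, end_line: int) -> Tuple[int, int]:
--     """Convert line range [start_line, end_line] (0-based inclusive) to char span."""
--     start = sum(len(content_lines[k]) + 1 for k in range(start_line))
--     end = start
--     for k in range(start_line, end_line + 1):
--         end += len(content_lines[k])
--         if k < end_line:
--             end += 1  # newline between lines
--     return (start, end)
-- ===== SOURCE B (Python) =====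
-- from itertools import accumulate
-- from typing import List, Tuple
--
-- def _lines_to_span(content_lines: List[str], start_line: int, end_line: int) -> Tuple[int, int]:
--     """Convert line range [start_line, end_line] (0-based inclusive) to char span."""
--     offsets = list(accumulate((len(l) + 1 for l in content_lines), initial=0))
--     start = offsets[start_line]
--     if end_line < start_line:
--         return (start, start)
--     return (start, offsets[end_line] + len(content_lines[end_line]))
-- ===== Notes on version B (the rewrite author's own statement) =====
-- stated objective: alternative
-- what changed: B builds a prefix-offset table once with itertools.accumulate and answers both span endpoints by constant-time lookups, instead of A's two separate summing scans (one for start, one loop for end with a per-iteration newline branch).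
-- outside the precondition, e.g. on _lines_to_span(['ab', 'c'], -1, -1): A returns (0, 1), B returns (5, 6)
import Mathlib
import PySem

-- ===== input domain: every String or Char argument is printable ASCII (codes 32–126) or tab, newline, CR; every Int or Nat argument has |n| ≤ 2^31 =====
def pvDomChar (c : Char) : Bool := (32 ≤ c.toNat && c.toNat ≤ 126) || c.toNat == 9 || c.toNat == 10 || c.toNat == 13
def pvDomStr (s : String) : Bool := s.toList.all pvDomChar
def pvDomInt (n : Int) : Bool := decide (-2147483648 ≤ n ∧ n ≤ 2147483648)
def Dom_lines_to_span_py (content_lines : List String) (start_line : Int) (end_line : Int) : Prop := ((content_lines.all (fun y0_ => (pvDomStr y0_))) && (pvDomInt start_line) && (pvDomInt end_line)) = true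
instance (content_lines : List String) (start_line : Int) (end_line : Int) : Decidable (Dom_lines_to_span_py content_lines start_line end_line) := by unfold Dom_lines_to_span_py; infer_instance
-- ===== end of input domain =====

-- B replaces A's two summing scans by one accumulate pass building a prefix-offset
-- table plus constant-time lookups (objective: alternative decomposition, same cost).

-- ===== PORT A =====
-- start = sum(len(content_lines[k]) + 1 for k in range(start_line));
-- then a loop k in range(start_line, end_line+1) adding len plus a newline if k < end_line.
def lines_to_span_py (content_lines : List String) (start_line : Int) (end_line : Int) : Int × Int :=
  let start : Int :=
    (PySem.List.pyRange 0 start_line 1).foldl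
      (fun acc k => acc + (PySem.Str.len (PySem.List.pyGetD content_lines k "") + 1)) 0
  let endv : Int :=
    (PySem.List.pyRange start_line (end_line + 1) 1).foldl
      (fun acc k =>
        acc + PySem.Str.len (PySem.List.pyGetD content_lines k "")
            + (if k < end_line then 1 else 0)) start
  (start, endv)

-- ===== PORT B =====
-- offsets = accumulate(len(l)+1, initial=0)  (= List.scanl);  then two lookups.
def lines_to_span_py_alt (content_lines : List String) (start_line : Int) (end_line : Int) : Int × Int :=
  let offsets : List Int :=
    List.scanl (fun acc l => acc + (PySem.Str.len l + 1)) 0 content_lines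
  let start : Int := PySem.List.pyGetD offsets start_line 0
  if end_line < start_line then (start, start)
  else (start, PySem.List.pyGetD offsets end_line 0
               + PySem.Str.len (PySem.List.pyGetD content_lines end_line ""))

-- ===== PRECONDITION & SPEC =====
-- Pre_ excludes (a) out-of-range line indices on which A raises IndexError, and
-- (b) negative start_line, where A's value comes from Python's accidental
-- negative-index wraparound in a sum that no caller of a line-range converter relies on.
def Pre_lines_to_span_py (content_lines : List String) (start_line : Int) (end_line : Int) : Prop :=
  0 ≤ start_line ∧ start_line ≤ (content_lines.length : Int) ∧
    (end_line < start_line ∨ end_line < (content_lines.length : Int))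
instance (content_lines : List String) (start_line : Int) (end_line : Int) : Decidable (Pre_lines_to_span_py content_lines start_line end_line) := by unfold Pre_lines_to_span_py; infer_instance

def pvWitness_lines_to_span_py : List String × Int × Int := (["ab", "c"], 0, 1)

def Spec_lines_to_span_py (content_lines : List String) (start_line : Int) (end_line : Int) (out : Int × Int) : Prop := out = lines_to_span_py_alt content_lines start_line end_line
instance (content_lines : List String) (start_line : Int) (end_line : Int) (out : Int × Int) : Decidable (Spec_lines_to_span_py content_lines start_line end_line out) := by unfold Spec_lines_to_span_py; infer_instance

-- ===== CLAIM (what is proved, stated in full; the proofs are below) =====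
def Claim_equal_lines_to_span_py : Prop := ∀ (content_lines : List String) (start_line : Int) (end_line : Int), Dom_lines_to_span_py content_lines start_line end_line → Pre_lines_to_span_py content_lines start_line end_line → Spec_lines_to_span_py content_lines start_line end_line (lines_to_span_py content_lines start_line end_line)

-- ===== LEMMAS AND PROOFS =====

-- prefix sum of (len l + 1) over the first m lines
def pvOff (cl : List String) (m : Nat) : Int :=
  ((cl.map (fun l => PySem.Str.len l + 1)).take m).sum

theorem pvOff_zero (cl : List String) : pvOff cl 0 = 0 := by simp [pvOff]

theorem pvOff_succ (cl : List String) (m : Nat) (h : m < cl.length) :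
    pvOff cl (m + 1) = pvOff cl m + (PySem.Str.len cl[m] + 1) := by
  unfold pvOff
  rw [List.sum_take_succ _ m (by simpa using h)]
  simp

theorem pvOff_cons_succ (l : String) (cl : List String) (m : Nat) :
    pvOff (l :: cl) (m + 1) = (PySem.Str.len l + 1) + pvOff cl m := by
  unfold pvOff
  simp [List.take_succ_cons]

-- A's summing scan over range(a, b) equals the difference of prefix offsets
theorem pvFoldA (cl : List String) (a b : Nat) (hab : a <= b) (hb : b <= cl.length) (c : Int) :
    (PySem.List.pyRange (a : Int) (b : Int) 1).foldl
      (fun acc k => acc + (PySem.Str.len (PySem.List.pyGetD cl k "") + 1)) c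
      = c + (pvOff cl b - pvOff cl a) := by
  induction b, hab using Nat.le_induction with
  | base => rw [PySem.List.pyRange_one_eq_nil (le_refl _)]; simp
  | succ b hab ih =>
      have hb' : b < cl.length := by omega
      have h1 : ((b : Int) + 1) = ((b + 1 : Nat) : Int) := by push_cast; ring
      rw [<- h1, PySem.List.pyRange_one_succ_right (by exact_mod_cast hab), List.foldl_append]
      rw [ih (by omega)]
      simp only [List.foldl_cons, List.foldl_nil]
      rw [PySem.List.pyGetD_natCast, List.getD_eq_getElem _ _ hb', pvOff_succ cl b hb']
      ring

-- B's offsets table: entry m of the scanl is the prefix offset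
theorem pvScanl_getD (cl : List String) (c : Int) (m : Nat) (hm : m <= cl.length) :
    (List.scanl (fun acc l => acc + (PySem.Str.len l + 1)) c cl).getD m 0
      = c + pvOff cl m := by
  induction cl generalizing c m with
  | nil =>
      have : m = 0 := by simpa using hm
      subst this; simp [pvOff]
  | cons l cl ih =>
      cases m with
      | zero => simp [pvOff]
      | succ m =>
          rw [List.scanl_cons]
          simp only [List.getD_cons_succ]
          rw [ih (c + (PySem.Str.len l + 1)) m (by simpa using hm), pvOff_cons_succ]
          ring

-- ===== VERDICT (by name: the statement is the Claim_ definition above) =====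
theorem lines_to_span_py_spec : Claim_equal_lines_to_span_py := by
  intro cl s e _ hpre
  obtain ⟨h_s0, hsn, hor⟩ := hpre
  unfold Spec_lines_to_span_py lines_to_span_py lines_to_span_py_alt
  simp only []
  set n := cl.length with hn
  have hsnat : s = ((s.toNat : Nat) : Int) := by omega
  have hsle : s.toNat <= n := by omega
  have hstart :
      (PySem.List.pyRange 0 s 1).foldl
        (fun acc k => acc + (PySem.Str.len (PySem.List.pyGetD cl k "") + 1)) 0
        = pvOff cl s.toNat := by
    have h := pvFoldA cl 0 s.toNat (Nat.zero_le _) hsle 0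
    simp only [Nat.cast_zero, pvOff_zero, zero_add, sub_zero] at h
    rw [hsnat]
    exact h
  have hoffs : PySem.List.pyGetD
      (List.scanl (fun acc l => acc + (PySem.Str.len l + 1)) 0 cl) s 0
      = pvOff cl s.toNat := by
    have h := pvScanl_getD cl 0 s.toNat hsle
    simp only [zero_add] at h
    rw [hsnat, PySem.List.pyGetD_natCast]
    exact h
  by_cases hcase : e < s
  · -- empty loop in A; guard branch in B
    rw [if_pos hcase, hstart, hoffs]
    rw [PySem.List.pyRange_one_eq_nil (by omega : e + 1 <= s)]
    simp
  · -- s <= e < n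
    have hse : s <= e := by omega
    have hen : e < (n : Int) := by
      cases hor with
      | inl h => omega
      | inr h => exact h
    have henat : e = ((e.toNat : Nat) : Int) := by omega
    have hen' : e.toNat < n := by omega
    rw [if_neg hcase, hstart, hoffs]
    refine Prod.ext rfl ?_
    rw [PySem.List.pyRange_one_succ_right hse, List.foldl_append]
    have hcongr :
        (PySem.List.pyRange s e 1).foldl
          (fun acc k => acc + PySem.Str.len (PySem.List.pyGetD cl k "")
              + (if k < e then 1 else 0)) (pvOff cl s.toNat)
          = (PySem.List.pyRange s e 1).foldl
          (fun acc k => acc + (PySem.Str.len (PySem.List.pyGetD cl k "") + 1))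
            (pvOff cl s.toNat) := by
      apply PySem.List.foldl_congr_mem
      intro acc k hk
      have hk' : k < e := (PySem.List.mem_pyRange_one.mp hk).2
      rw [if_pos hk']; ring
    rw [hcongr]
    have hmain :
        (PySem.List.pyRange s e 1).foldl
          (fun acc k => acc + (PySem.Str.len (PySem.List.pyGetD cl k "") + 1))
          (pvOff cl s.toNat)
          = pvOff cl s.toNat + (pvOff cl e.toNat - pvOff cl s.toNat) := by
      conv_lhs => rw [hsnat, henat]
      exact pvFoldA cl s.toNat e.toNat (by omega) (by omega) _
    rw [hmain]
    simp only [List.foldl_cons, List.foldl_nil]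
    rw [if_neg (lt_irrefl e)]
    have hoffe : PySem.List.pyGetD
        (List.scanl (fun acc l => acc + (PySem.Str.len l + 1)) 0 cl) e 0
        = pvOff cl e.toNat := by
      have h := pvScanl_getD cl 0 e.toNat (by omega)
      simp only [zero_add] at h
      rw [henat, PySem.List.pyGetD_natCast]
      exact h
    rw [hoffe]
    ring
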